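-- pv_equiv track=rewrite | github.com/seungjunGong/seungjunGong-baekjoonStudy | 프로그래머스/Lv.3/84021. 퍼즐 조각 채우기/퍼즐 조각 채우기.py | make_box
-- ===== SOURCE A (Python) =====
-- def make_box(block):
--     x, y = zip(*block)
--     col, row = max(x) - min(x) + 1, max(y) - min(y) + 1
--     box = [[0] * row for _ in range(col)]
--
--     for i, j in block:
--         i, j = i - min(x), j - min(y)
--         box[i][j] = 1
--     return box
-- ===== SOURCE B (Python) =====
-- def make_box(block):
--     x, y = zip(*block)
--     mnx, mny = min(x), min(y)
--     col, row = max(x) - mnx + 1, max(y) - mny + 1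
--     S = {(i - mnx, j - mny) for i, j in block}
--     return [[1 if (i, j) in S else 0 for j in range(row)] for i in range(col)]
-- ===== Notes on version B (the rewrite author's own statement) =====
-- stated objective: alternative
-- what changed: B precomputes the set of shifted coordinates and builds the grid by gathering (a membership test per output cell) instead of allocating a zero grid and scatter-writing 1s into it.
import Mathlib
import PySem

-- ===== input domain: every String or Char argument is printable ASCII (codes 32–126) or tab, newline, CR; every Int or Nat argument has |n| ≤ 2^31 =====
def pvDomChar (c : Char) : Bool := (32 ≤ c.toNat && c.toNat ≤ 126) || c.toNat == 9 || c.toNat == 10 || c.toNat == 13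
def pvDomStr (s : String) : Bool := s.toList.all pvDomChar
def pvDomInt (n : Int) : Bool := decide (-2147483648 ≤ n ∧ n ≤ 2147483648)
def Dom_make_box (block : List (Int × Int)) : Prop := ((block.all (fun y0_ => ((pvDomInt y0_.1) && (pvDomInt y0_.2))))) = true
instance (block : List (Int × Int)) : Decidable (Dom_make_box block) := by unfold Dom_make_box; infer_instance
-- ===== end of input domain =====

-- B builds the bounding-box grid by gathering (membership of each output cell in a precomputed
-- shifted-coordinate set) instead of A's scatter-writes into a zero grid; objective: alternative.


-- ===== PORT A =====
-- 'x, y = zip(*block)' raises ValueError on an empty block; that input is excluded by Pre_,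
-- the [] branch below is unreachable under it. Python recomputes min(x)/min(y) inside the
-- loop body; the port does the same. box[i][j] = 1 is ported as pyGetD/pySetD (indices are
-- provably nonnegative and in range, so the total forms are exact here).
def make_box (block : List (Int × Int)) : List (List Int) :=
  match block with
  | [] => []
  | _ :: _ =>
    (block.foldl
      (fun box p =>
        PySem.List.pySetD box (p.1 - (PySem.List.min? (block.map Prod.fst) (fun v => v)).getD 0)
          (PySem.List.pySetD
            (PySem.List.pyGetD box (p.1 - (PySem.List.min? (block.map Prod.fst) (fun v => v)).getD 0) [])
            (p.2 - (PySem.List.min? (block.map Prod.snd) (fun v => v)).getD 0) 1))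
      ((PySem.List.pyRange 0
          ((PySem.List.max? (block.map Prod.fst) (fun v => v)).getD 0
            - (PySem.List.min? (block.map Prod.fst) (fun v => v)).getD 0 + 1) 1).map
        (fun _ => PySem.List.pyRepeat [(0 : Int)]
          ((PySem.List.max? (block.map Prod.snd) (fun v => v)).getD 0
            - (PySem.List.min? (block.map Prod.snd) (fun v => v)).getD 0 + 1))))

-- ===== PORT B =====
def make_box_alt (block : List (Int × Int)) : List (List Int) :=
  match block with
  | [] => []
  | _ :: _ =>
    let mnx := (PySem.List.min? (block.map Prod.fst) (fun v => v)).getD 0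
    let mny := (PySem.List.min? (block.map Prod.snd) (fun v => v)).getD 0
    let col := (PySem.List.max? (block.map Prod.fst) (fun v => v)).getD 0 - mnx + 1
    let row := (PySem.List.max? (block.map Prod.snd) (fun v => v)).getD 0 - mny + 1
    let S : PySem.Set (Int × Int) := PySem.Set.ofList (block.map (fun p => (p.1 - mnx, p.2 - mny)))
    (PySem.List.pyRange 0 col 1).map (fun i =>
      (PySem.List.pyRange 0 row 1).map (fun j => if (i, j) ∈ S then (1 : Int) else 0))

-- ===== PRECONDITION & SPEC =====
-- Pre_ excludes only the empty block, on which A's 'zip(*block)' raises ValueError.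
def Pre_make_box (block : List (Int × Int)) : Prop := block ≠ []
instance (block : List (Int × Int)) : Decidable (Pre_make_box block) := by unfold Pre_make_box; infer_instance
def pvWitness_make_box : (List (Int × Int)) := [(0, 0), (1, 2)]
def Spec_make_box (block : List (Int × Int)) (out : List (List Int)) : Prop := out = make_box_alt block
instance (block : List (Int × Int)) (out : List (List Int)) : Decidable (Spec_make_box block out) := by unfold Spec_make_box; infer_instance

-- ===== CLAIM (what is proved, stated in full; the proofs are below) =====
def Claim_equal_make_box : Prop := ∀ (block : List (Int × Int)), Dom_make_box block → Pre_make_box block → Spec_make_box block (make_box block)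

-- ===== LEMMAS AND PROOFS =====

-- the gather grid: 1 at (i, j) iff (i, j) is in s
def gath (s : List (Int × Int)) (col row : Int) : List (List Int) :=
  (PySem.List.pyRange 0 col 1).map (fun i =>
    (PySem.List.pyRange 0 row 1).map (fun j => if (i, j) ∈ s then (1 : Int) else 0))

theorem gath_congr (s t : List (Int × Int)) (col row : Int)
    (h : ∀ p, p ∈ s ↔ p ∈ t) : gath s col row = gath t col row := by
  unfold gath
  refine List.map_congr_left ?_
  intro i _
  refine List.map_congr_left ?_
  intro j _
  simp [h]

theorem gath_empty (col row : Int) :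
    gath [] col row
      = (PySem.List.pyRange 0 col 1).map (fun _ => PySem.List.pyRepeat [(0 : Int)] row) := by
  unfold gath
  refine List.map_congr_left ?_
  intro i _
  rw [PySem.List.pyRepeat_singleton]
  simp [List.map_const', PySem.List.length_pyRange_one]

theorem gath_set (s : List (Int × Int)) (col row a b : Int)
    (ha0 : 0 ≤ a) (ha1 : a < col) (hb0 : 0 ≤ b) (hb1 : b < row) :
    PySem.List.pySetD (gath s col row) a
      (PySem.List.pySetD (PySem.List.pyGetD (gath s col row) a []) b 1)
      = gath ((a, b) :: s) col row := by
  have hlen : (gath s col row).length = col.toNat := by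
    simp [gath, PySem.List.length_pyRange_one]
  rw [PySem.List.pySetD_of_nonneg _ _ ha0,
      PySem.List.pyGetD_eq_getElem _ _ ha0 (by omega),
      PySem.List.pySetD_of_nonneg _ _ hb0]
  refine List.ext_getElem (by simp [gath, PySem.List.length_pyRange_one]) ?_
  intro n h1 h2
  have hn : n < col.toNat := by
    simp [gath, PySem.List.length_pyRange_one] at h2; omega
  rw [List.getElem_set]
  by_cases hna : a.toNat = n
  · simp only [if_pos hna]
    subst hna
    refine List.ext_getElem (by simp [gath, PySem.List.length_pyRange_one]) ?_
    intro m m1 m2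
    have hm : m < row.toNat := by
      simp [gath, PySem.List.length_pyRange_one] at m2; omega
    rw [List.getElem_set]
    simp only [gath, List.getElem_map, PySem.List.getElem_pyRange_one, zero_add,
      Int.toNat_of_nonneg ha0]
    by_cases hmb : b.toNat = m
    · have hmB : ((m : Int)) = b := by omega
      simp [hmb, hmB]
    · have hmB : ((m : Int)) ≠ b := by omega
      simp only [if_neg hmb, List.mem_cons, Prod.mk.injEq]
      simp [hmB]
  · simp only [if_neg hna]
    have hnA : ((n : Int)) ≠ a := by omega
    simp only [gath, List.getElem_map, PySem.List.getElem_pyRange_one, zero_add]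
    refine List.map_congr_left ?_
    intro j _
    simp [hnA]

theorem scatter (mnx mny col row : Int) (l : List (Int × Int)) :
    ∀ s : List (Int × Int),
    (∀ p ∈ l, 0 ≤ p.1 - mnx ∧ p.1 - mnx < col ∧ 0 ≤ p.2 - mny ∧ p.2 - mny < row) →
    l.foldl
      (fun box p =>
        PySem.List.pySetD box (p.1 - mnx)
          (PySem.List.pySetD (PySem.List.pyGetD box (p.1 - mnx) []) (p.2 - mny) 1))
      (gath s col row)
    = gath ((l.map (fun p => (p.1 - mnx, p.2 - mny))).reverse ++ s) col row := by
  induction l with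
  | nil => intro s _; simp
  | cons p t ih =>
    intro s hb
    obtain ⟨h1, h2, h3, h4⟩ := hb p (by simp)
    rw [List.foldl_cons, gath_set s col row _ _ h1 h2 h3 h4,
        ih _ (fun q hq => hb q (by simp [hq]))]
    simp [List.append_assoc]

-- ===== VERDICT (by name: the statement is the Claim_ definition above) =====
theorem make_box_spec : Claim_equal_make_box := by
  intro block _ hpre
  unfold Spec_make_box
  match block with
  | [] => exact absurd rfl hpre
  | q :: t =>
    simp only [make_box, make_box_alt]
    obtain ⟨mnx, hmnx⟩ : ∃ m, PySem.List.min? ((q :: t).map Prod.fst) (fun v => v) = some m := by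
      cases h : PySem.List.min? ((q :: t).map Prod.fst) (fun v => v) with
      | none => simp [PySem.List.min?_eq_none_iff] at h
      | some m => exact ⟨m, rfl⟩
    obtain ⟨mny, hmny⟩ : ∃ m, PySem.List.min? ((q :: t).map Prod.snd) (fun v => v) = some m := by
      cases h : PySem.List.min? ((q :: t).map Prod.snd) (fun v => v) with
      | none => simp [PySem.List.min?_eq_none_iff] at h
      | some m => exact ⟨m, rfl⟩
    obtain ⟨mxx, hmxx⟩ : ∃ m, PySem.List.max? ((q :: t).map Prod.fst) (fun v => v) = some m := by
      cases h : PySem.List.max? ((q :: t).map Prod.fst) (fun v => v) with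
      | none => simp [PySem.List.max?_eq_none_iff] at h
      | some m => exact ⟨m, rfl⟩
    obtain ⟨mxy, hmxy⟩ : ∃ m, PySem.List.max? ((q :: t).map Prod.snd) (fun v => v) = some m := by
      cases h : PySem.List.max? ((q :: t).map Prod.snd) (fun v => v) with
      | none => simp [PySem.List.max?_eq_none_iff] at h
      | some m => exact ⟨m, rfl⟩
    rw [hmnx, hmny, hmxx, hmxy]
    simp only [Option.getD_some]
    have hbounds : ∀ p ∈ (q :: t),
        0 ≤ p.1 - mnx ∧ p.1 - mnx < mxx - mnx + 1 ∧ 0 ≤ p.2 - mny ∧ p.2 - mny < mxy - mny + 1 := by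
      intro p hp
      have h1 := PySem.List.min?_isMin hmnx p.1 (List.mem_map_of_mem hp)
      have h2 := PySem.List.max?_isMax hmxx p.1 (List.mem_map_of_mem hp)
      have h3 := PySem.List.min?_isMin hmny p.2 (List.mem_map_of_mem hp)
      have h4 := PySem.List.max?_isMax hmxy p.2 (List.mem_map_of_mem hp)
      refine ⟨by omega, by omega, by omega, by omega⟩
    rw [← gath_empty, scatter mnx mny (mxx - mnx + 1) (mxy - mny + 1) (q :: t) [] hbounds,
        List.append_nil]
    refine gath_congr _ _ _ _ ?_
    intro p
    simp [PySem.Set.mem_ofList]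
    exact or_comm
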